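-- pv_equiv track=rewrite | github.com/bpluis/WrestlingBot | cogs/wrestler.py | filter_moves_by_alignment
-- ===== SOURCE A (Python) =====
-- from typing import Optional, List
--
-- HEEL_KEYWORDS = ['choke', 'sleeper', 'guillotine', 'rear naked', 'trap', 'heel', 'behind']
--
-- FACE_KEYWORDS = ['splash', 'press', 'crossbody', 'moonsault', 'elbow drop']
--
-- TECHNICAL_KEYWORDS = ['lock', 'bar', 'crab', 'stretch', 'figure']
--
-- POWER_KEYWORDS = ['slam', 'bomb', 'press', 'gorilla', 'military']
--
-- AERIAL_KEYWORDS = ['diving', 'springboard', 'moonsault', 'splash', 'shooting star', 'top rope']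
--
-- def filter_moves_by_alignment(available_moves: List[str], alignment: str, archetype: str = "Balanced") -> List[str]:
--     """Filter moves based on alignment and archetype"""
--
--     scored_moves = []
--
--     for move in available_moves:
--         move_lower = move.lower()
--         score = 0
--
--         # Alignment scoring
--         if alignment == "Heel":
--             if any(kw in move_lower for kw in HEEL_KEYWORDS):
--                 score += 3
--         elif alignment == "Face":
--             if any(kw in move_lower for kw in FACE_KEYWORDS):
--                 score += 3
--             if any(kw in move_lower for kw in HEEL_KEYWORDS):
--                 score -= 2
--
--         # Archetype scoring
--         if archetype == "Technical":
--             if any(kw in move_lower for kw in TECHNICAL_KEYWORDS):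
--                 score += 2
--         elif archetype == "Powerhouse":
--             if any(kw in move_lower for kw in POWER_KEYWORDS):
--                 score += 2
--         elif archetype == "High Flyer":
--             if any(kw in move_lower for kw in AERIAL_KEYWORDS):
--                 score += 2
--
--         scored_moves.append((move, score))
--
--     scored_moves.sort(key=lambda x: x[1], reverse=True)
--     result = [move for move, score in scored_moves[:6]]
--
--     if len(result) < 5 and len(available_moves) > len(result):
--         remaining = [m for m in available_moves if m not in result]
--         result.extend(remaining[:5-len(result)])
--
--     return result
-- ===== SOURCE B (Python) =====
-- from typing import List
--
-- HEEL_KEYWORDS = ['choke', 'sleeper', 'guillotine', 'rear naked', 'trap', 'heel', 'behind']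
-- FACE_KEYWORDS = ['splash', 'press', 'crossbody', 'moonsault', 'elbow drop']
-- TECHNICAL_KEYWORDS = ['lock', 'bar', 'crab', 'stretch', 'figure']
-- POWER_KEYWORDS = ['slam', 'bomb', 'press', 'gorilla', 'military']
-- AERIAL_KEYWORDS = ['diving', 'springboard', 'moonsault', 'splash', 'shooting star', 'top rope']
--
--
-- def _score(move: str, alignment: str, archetype: str) -> int:
--     ml = move.lower()
--     hit = lambda kws: any(kw in ml for kw in kws)
--     if alignment == "Heel":
--         base = 3 if hit(HEEL_KEYWORDS) else 0
--     elif alignment == "Face":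
--         base = (3 if hit(FACE_KEYWORDS) else 0) - (2 if hit(HEEL_KEYWORDS) else 0)
--     else:
--         base = 0
--     if archetype == "Technical":
--         bonus = 2 if hit(TECHNICAL_KEYWORDS) else 0
--     elif archetype == "Powerhouse":
--         bonus = 2 if hit(POWER_KEYWORDS) else 0
--     elif archetype == "High Flyer":
--         bonus = 2 if hit(AERIAL_KEYWORDS) else 0
--     else:
--         bonus = 0
--     return base + bonus
--
--
-- def filter_moves_by_alignment(available_moves: List[str], alignment: str, archetype: str = "Balanced") -> List[str]:
--     """Bucket moves by their score (only 5,3,2,1,0,-2 are possible), emit buckets high-to-low, take 6."""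
--     b5, b3, b2, b1, b0, bm = [], [], [], [], [], []
--     for move in available_moves:
--         s = _score(move, alignment, archetype)
--         if s == 5:
--             b5.append(move)
--         elif s == 3:
--             b3.append(move)
--         elif s == 2:
--             b2.append(move)
--         elif s == 1:
--             b1.append(move)
--         elif s == 0:
--             b0.append(move)
--         else:
--             bm.append(move)
--     return (b5 + b3 + b2 + b1 + b0 + bm)[:6]
-- ===== Notes on version B (the rewrite author's own statement) =====
-- stated objective: alternative
-- what changed: Replaces the build-then-stable-reverse-sort of (move,score) pairs by single-pass bucketing into the six possible score values (5,3,2,1,0,-2), concatenating buckets high-to-low and slicing the first 6; the dead fallback block is dropped.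
import Mathlib
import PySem

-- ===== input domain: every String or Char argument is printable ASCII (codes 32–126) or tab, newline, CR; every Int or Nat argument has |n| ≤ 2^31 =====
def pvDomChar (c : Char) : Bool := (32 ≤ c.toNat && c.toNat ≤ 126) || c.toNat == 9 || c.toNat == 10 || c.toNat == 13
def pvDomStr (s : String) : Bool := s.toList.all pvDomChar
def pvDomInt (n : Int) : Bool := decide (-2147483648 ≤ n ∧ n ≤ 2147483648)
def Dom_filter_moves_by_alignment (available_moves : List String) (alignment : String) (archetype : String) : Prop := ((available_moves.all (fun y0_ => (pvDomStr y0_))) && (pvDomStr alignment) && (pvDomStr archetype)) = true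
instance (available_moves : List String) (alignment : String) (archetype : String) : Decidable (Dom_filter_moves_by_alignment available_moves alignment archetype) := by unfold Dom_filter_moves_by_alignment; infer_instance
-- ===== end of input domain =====

-- B replaces A's build-then-stable-reverse-sort by one-pass bucketing into the six possible
-- score values, concatenated high-to-low; an alternative decomposition, not claimed faster.

def HEEL_KEYWORDS : List String := ["choke", "sleeper", "guillotine", "rear naked", "trap", "heel", "behind"]
def FACE_KEYWORDS : List String := ["splash", "press", "crossbody", "moonsault", "elbow drop"]
def TECHNICAL_KEYWORDS : List String := ["lock", "bar", "crab", "stretch", "figure"]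
def POWER_KEYWORDS : List String := ["slam", "bomb", "press", "gorilla", "military"]
def AERIAL_KEYWORDS : List String := ["diving", "springboard", "moonsault", "splash", "shooting star", "top rope"]

-- ===== PORT A =====
def filter_moves_by_alignment (available_moves : List String) (alignment : String) (archetype : String) : List String :=
  let scored_moves : List (String × Int) := available_moves.foldl (fun acc move =>
    let move_lower := PySem.Str.lower move
    let score : Int := 0
    let score :=
      if alignment = "Heel" then
        if HEEL_KEYWORDS.any (fun kw => PySem.Str.isIn kw move_lower) then score + 3 else score
      else if alignment = "Face" then
        let score := if FACE_KEYWORDS.any (fun kw => PySem.Str.isIn kw move_lower) then score + 3 else score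
        if HEEL_KEYWORDS.any (fun kw => PySem.Str.isIn kw move_lower) then score - 2 else score
      else score
    let score :=
      if archetype = "Technical" then
        if TECHNICAL_KEYWORDS.any (fun kw => PySem.Str.isIn kw move_lower) then score + 2 else score
      else if archetype = "Powerhouse" then
        if POWER_KEYWORDS.any (fun kw => PySem.Str.isIn kw move_lower) then score + 2 else score
      else if archetype = "High Flyer" then
        if AERIAL_KEYWORDS.any (fun kw => PySem.Str.isIn kw move_lower) then score + 2 else score
      else score
    acc ++ [(move, score)]) []
  let sortedMoves := PySem.List.sorted scored_moves (fun x => x.2) true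
  let result := (PySem.List.slice sortedMoves none (some 6)).map (fun p => p.1)
  if PySem.List.len result < 5 ∧ PySem.List.len available_moves > PySem.List.len result then
    let remaining := available_moves.filter (fun m => !result.contains m)
    result ++ PySem.List.slice remaining none (some (5 - PySem.List.len result))
  else result

-- ===== PORT B =====
def pvScore (move : String) (alignment : String) (archetype : String) : Int :=
  let ml := PySem.Str.lower move
  let hit := fun (kws : List String) => kws.any (fun kw => PySem.Str.isIn kw ml)
  let base : Int :=
    if alignment = "Heel" then (if hit HEEL_KEYWORDS then 3 else 0)
    else if alignment = "Face" then
      (if hit FACE_KEYWORDS then 3 else 0) - (if hit HEEL_KEYWORDS then 2 else 0)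
    else 0
  let bonus : Int :=
    if archetype = "Technical" then (if hit TECHNICAL_KEYWORDS then 2 else 0)
    else if archetype = "Powerhouse" then (if hit POWER_KEYWORDS then 2 else 0)
    else if archetype = "High Flyer" then (if hit AERIAL_KEYWORDS then 2 else 0)
    else 0
  base + bonus

def filter_moves_by_alignment_alt (available_moves : List String) (alignment : String) (archetype : String) : List String :=
  let bs := available_moves.foldl (fun acc move =>
      let s := pvScore move alignment archetype
      if s = 5 then (acc.1 ++ [move], acc.2.1, acc.2.2.1, acc.2.2.2.1, acc.2.2.2.2.1, acc.2.2.2.2.2)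
      else if s = 3 then (acc.1, acc.2.1 ++ [move], acc.2.2.1, acc.2.2.2.1, acc.2.2.2.2.1, acc.2.2.2.2.2)
      else if s = 2 then (acc.1, acc.2.1, acc.2.2.1 ++ [move], acc.2.2.2.1, acc.2.2.2.2.1, acc.2.2.2.2.2)
      else if s = 1 then (acc.1, acc.2.1, acc.2.2.1, acc.2.2.2.1 ++ [move], acc.2.2.2.2.1, acc.2.2.2.2.2)
      else if s = 0 then (acc.1, acc.2.1, acc.2.2.1, acc.2.2.2.1, acc.2.2.2.2.1 ++ [move], acc.2.2.2.2.2)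
      else (acc.1, acc.2.1, acc.2.2.1, acc.2.2.2.1, acc.2.2.2.2.1, acc.2.2.2.2.2 ++ [move]))
    (([], [], [], [], [], []) : List String × List String × List String × List String × List String × List String)
  PySem.List.slice (bs.1 ++ bs.2.1 ++ bs.2.2.1 ++ bs.2.2.2.1 ++ bs.2.2.2.2.1 ++ bs.2.2.2.2.2) none (some 6)

-- ===== PRECONDITION & SPEC =====
def Spec_filter_moves_by_alignment (available_moves : List String) (alignment : String) (archetype : String) (out : List String) : Prop := out = filter_moves_by_alignment_alt available_moves alignment archetype
instance (available_moves : List String) (alignment : String) (archetype : String) (out : List String) : Decidable (Spec_filter_moves_by_alignment available_moves alignment archetype out) := by unfold Spec_filter_moves_by_alignment; infer_instance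

-- ===== CLAIM (what is proved, stated in full; the proofs are below) =====
def Claim_equal_filter_moves_by_alignment : Prop := ∀ (available_moves : List String) (alignment : String) (archetype : String), Dom_filter_moves_by_alignment available_moves alignment archetype → Spec_filter_moves_by_alignment available_moves alignment archetype (filter_moves_by_alignment available_moves alignment archetype)

-- ===== LEMMAS AND PROOFS =====

-- A's inline score computation equals B's helper pvScore (pure case analysis).
theorem pvScore_eq_inline (move alignment archetype : String) :
    (let move_lower := PySem.Str.lower move
     let score : Int := 0
     let score :=
       if alignment = "Heel" then
         if HEEL_KEYWORDS.any (fun kw => PySem.Str.isIn kw move_lower) then score + 3 else score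
       else if alignment = "Face" then
         let score := if FACE_KEYWORDS.any (fun kw => PySem.Str.isIn kw move_lower) then score + 3 else score
         if HEEL_KEYWORDS.any (fun kw => PySem.Str.isIn kw move_lower) then score - 2 else score
       else score
     let score :=
       if archetype = "Technical" then
         if TECHNICAL_KEYWORDS.any (fun kw => PySem.Str.isIn kw move_lower) then score + 2 else score
       else if archetype = "Powerhouse" then
         if POWER_KEYWORDS.any (fun kw => PySem.Str.isIn kw move_lower) then score + 2 else score
       else if archetype = "High Flyer" then
         if AERIAL_KEYWORDS.any (fun kw => PySem.Str.isIn kw move_lower) then score + 2 else score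
       else score
     score) = pvScore move alignment archetype := by
  simp only [pvScore]
  split_ifs <;> omega

-- pvScore only takes the six values 5, 3, 2, 1, 0, -2.
theorem pvScore_range (move alignment archetype : String) :
    pvScore move alignment archetype = 5 ∨ pvScore move alignment archetype = 3 ∨
    pvScore move alignment archetype = 2 ∨ pvScore move alignment archetype = 1 ∨
    pvScore move alignment archetype = 0 ∨ pvScore move alignment archetype = -2 := by
  simp only [pvScore]
  split_ifs <;> omega

-- insertBy with the reverse-sort predicate lands x right after the last ≥-key element.
theorem insertBy_mid {α : Type} (key : α → Int) (x : α) :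
    ∀ (as bs : List α), (∀ y ∈ as, ¬ (key y < key x)) → (∀ y ∈ bs, key y < key x) →
    PySem.List.insertBy (fun a b => decide (key b < key a)) x (as ++ bs) = as ++ x :: bs := by
  intro as
  induction as with
  | nil =>
      intro bs _ hbs
      cases bs with
      | nil => simp [PySem.List.insertBy]
      | cons y ys => simp [PySem.List.insertBy, hbs y (by simp)]
  | cons a t ih =>
      intro bs has hbs
      have hna : ¬ (key a < key x) := has a (by simp)
      simp only [List.cons_append, PySem.List.insertBy, decide_eq_true_eq, if_neg hna]
      have := ih bs (fun y hy => has y (by simp [hy])) hbs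
      simp [this]

-- Folding insertBy over a list whose keys lie in {5,3,2,1,0,-2}, starting from an
-- accumulator already in bucket form, yields the bucket concatenation.
theorem foldl_insertBy_buckets {α : Type} (key : α → Int) :
    ∀ (l f5 f3 f2 f1 f0 fm : List α),
    (∀ p ∈ f5, key p = 5) → (∀ p ∈ f3, key p = 3) → (∀ p ∈ f2, key p = 2) →
    (∀ p ∈ f1, key p = 1) → (∀ p ∈ f0, key p = 0) → (∀ p ∈ fm, key p = -2) →
    (∀ p ∈ l, key p = 5 ∨ key p = 3 ∨ key p = 2 ∨ key p = 1 ∨ key p = 0 ∨ key p = -2) →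
    l.foldl (fun acc x => PySem.List.insertBy (fun a b => decide (key b < key a)) x acc)
      (f5 ++ f3 ++ f2 ++ f1 ++ f0 ++ fm)
    = (f5 ++ l.filter (fun p => decide (key p = 5))) ++ (f3 ++ l.filter (fun p => decide (key p = 3)))
      ++ (f2 ++ l.filter (fun p => decide (key p = 2))) ++ (f1 ++ l.filter (fun p => decide (key p = 1)))
      ++ (f0 ++ l.filter (fun p => decide (key p = 0))) ++ (fm ++ l.filter (fun p => decide (key p = -2))) := by
  intro l
  induction l with
  | nil => intro f5 f3 f2 f1 f0 fm _ _ _ _ _ _ _; simp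
  | cons x t ih =>
      intro f5 f3 f2 f1 f0 fm h5 h3 h2 h1 h0 hm hl
      have hx := hl x (by simp)
      have ht : ∀ p ∈ t, key p = 5 ∨ key p = 3 ∨ key p = 2 ∨ key p = 1 ∨ key p = 0 ∨ key p = -2 :=
        fun p hp => hl p (by simp [hp])
      simp only [List.foldl_cons]
      rcases hx with hx | hx | hx | hx | hx | hx
      · -- key x = 5 : insert at end of f5
        have hstep : PySem.List.insertBy (fun a b => decide (key b < key a)) x
            (f5 ++ f3 ++ f2 ++ f1 ++ f0 ++ fm) = (f5 ++ [x]) ++ f3 ++ f2 ++ f1 ++ f0 ++ fm := by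
          have := insertBy_mid key x f5 (f3 ++ f2 ++ f1 ++ f0 ++ fm)
            (fun y hy => by have := h5 y hy; omega)
            (fun y hy => by
              simp only [List.mem_append] at hy
              rcases hy with (((hy | hy) | hy) | hy) | hy
              · have := h3 y hy; omega
              · have := h2 y hy; omega
              · have := h1 y hy; omega
              · have := h0 y hy; omega
              · have := hm y hy; omega)
          simp only [List.append_assoc] at this ⊢
          simp [this]
        rw [hstep, ih (f5 ++ [x]) f3 f2 f1 f0 fm
          (fun p hp => by rcases List.mem_append.1 hp with h | h; exacts [h5 p h, by simp only [List.mem_singleton] at h; subst h; exact hx])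
          h3 h2 h1 h0 hm ht]
        simp [hx, List.append_assoc]
      · -- key x = 3
        have hstep : PySem.List.insertBy (fun a b => decide (key b < key a)) x
            (f5 ++ f3 ++ f2 ++ f1 ++ f0 ++ fm) = f5 ++ (f3 ++ [x]) ++ f2 ++ f1 ++ f0 ++ fm := by
          have := insertBy_mid key x (f5 ++ f3) (f2 ++ f1 ++ f0 ++ fm)
            (fun y hy => by
              rcases List.mem_append.1 hy with h | h
              · have := h5 y h; omega
              · have := h3 y h; omega)
            (fun y hy => by
              simp only [List.mem_append] at hy
              rcases hy with ((hy | hy) | hy) | hy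
              · have := h2 y hy; omega
              · have := h1 y hy; omega
              · have := h0 y hy; omega
              · have := hm y hy; omega)
          simp only [List.append_assoc] at this ⊢
          simp [this]
        rw [hstep, ih f5 (f3 ++ [x]) f2 f1 f0 fm h5
          (fun p hp => by rcases List.mem_append.1 hp with h | h; exacts [h3 p h, by simp only [List.mem_singleton] at h; subst h; exact hx])
          h2 h1 h0 hm ht]
        simp [hx, List.append_assoc]
      · -- key x = 2
        have hstep : PySem.List.insertBy (fun a b => decide (key b < key a)) x
            (f5 ++ f3 ++ f2 ++ f1 ++ f0 ++ fm) = f5 ++ f3 ++ (f2 ++ [x]) ++ f1 ++ f0 ++ fm := by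
          have := insertBy_mid key x (f5 ++ f3 ++ f2) (f1 ++ f0 ++ fm)
            (fun y hy => by
              simp only [List.mem_append] at hy
              rcases hy with (hy | hy) | hy
              · have := h5 y hy; omega
              · have := h3 y hy; omega
              · have := h2 y hy; omega)
            (fun y hy => by
              simp only [List.mem_append] at hy
              rcases hy with (hy | hy) | hy
              · have := h1 y hy; omega
              · have := h0 y hy; omega
              · have := hm y hy; omega)
          simp only [List.append_assoc] at this ⊢
          simp [this]
        rw [hstep, ih f5 f3 (f2 ++ [x]) f1 f0 fm h5 h3
          (fun p hp => by rcases List.mem_append.1 hp with h | h; exacts [h2 p h, by simp only [List.mem_singleton] at h; subst h; exact hx])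
          h1 h0 hm ht]
        simp [hx, List.append_assoc]
      · -- key x = 1
        have hstep : PySem.List.insertBy (fun a b => decide (key b < key a)) x
            (f5 ++ f3 ++ f2 ++ f1 ++ f0 ++ fm) = f5 ++ f3 ++ f2 ++ (f1 ++ [x]) ++ f0 ++ fm := by
          have := insertBy_mid key x (f5 ++ f3 ++ f2 ++ f1) (f0 ++ fm)
            (fun y hy => by
              simp only [List.mem_append] at hy
              rcases hy with ((hy | hy) | hy) | hy
              · have := h5 y hy; omega
              · have := h3 y hy; omega
              · have := h2 y hy; omega
              · have := h1 y hy; omega)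
            (fun y hy => by
              rcases List.mem_append.1 hy with h | h
              · have := h0 y h; omega
              · have := hm y h; omega)
          simp only [List.append_assoc] at this ⊢
          simp [this]
        rw [hstep, ih f5 f3 f2 (f1 ++ [x]) f0 fm h5 h3 h2
          (fun p hp => by rcases List.mem_append.1 hp with h | h; exacts [h1 p h, by simp only [List.mem_singleton] at h; subst h; exact hx])
          h0 hm ht]
        simp [hx, List.append_assoc]
      · -- key x = 0
        have hstep : PySem.List.insertBy (fun a b => decide (key b < key a)) x
            (f5 ++ f3 ++ f2 ++ f1 ++ f0 ++ fm) = f5 ++ f3 ++ f2 ++ f1 ++ (f0 ++ [x]) ++ fm := by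
          have := insertBy_mid key x (f5 ++ f3 ++ f2 ++ f1 ++ f0) fm
            (fun y hy => by
              simp only [List.mem_append] at hy
              rcases hy with (((hy | hy) | hy) | hy) | hy
              · have := h5 y hy; omega
              · have := h3 y hy; omega
              · have := h2 y hy; omega
              · have := h1 y hy; omega
              · have := h0 y hy; omega)
            (fun y hy => by have := hm y hy; omega)
          simp only [List.append_assoc] at this ⊢
          simp [this]
        rw [hstep, ih f5 f3 f2 f1 (f0 ++ [x]) fm h5 h3 h2 h1
          (fun p hp => by rcases List.mem_append.1 hp with h | h; exacts [h0 p h, by simp only [List.mem_singleton] at h; subst h; exact hx])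
          hm ht]
        simp [hx, List.append_assoc]
      · -- key x = -2 : insert at the very end
        have hstep : PySem.List.insertBy (fun a b => decide (key b < key a)) x
            (f5 ++ f3 ++ f2 ++ f1 ++ f0 ++ fm) = f5 ++ f3 ++ f2 ++ f1 ++ f0 ++ (fm ++ [x]) := by
          have := PySem.List.insertBy_of_forall_not_before
            (fun a b => decide (key b < key a)) x (f5 ++ f3 ++ f2 ++ f1 ++ f0 ++ fm)
            (fun y hy => by
              simp only [List.mem_append] at hy
              rcases hy with ((((hy | hy) | hy) | hy) | hy) | hy
              · simp [h5 y hy, hx]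
              · simp [h3 y hy, hx]
              · simp [h2 y hy, hx]
              · simp [h1 y hy, hx]
              · simp [h0 y hy, hx]
              · simp [hm y hy, hx])
          simp only [List.append_assoc] at this ⊢
          simp [this]
        rw [hstep, ih f5 f3 f2 f1 f0 (fm ++ [x]) h5 h3 h2 h1 h0
          (fun p hp => by rcases List.mem_append.1 hp with h | h; exacts [hm p h, by simp only [List.mem_singleton] at h; subst h; exact hx])
          ht]
        simp [hx, List.append_assoc]

-- The stable reverse sort of a {5,3,2,1,0,-2}-keyed list is the bucket concatenation.
theorem sorted_rev_eq_buckets {α : Type} (key : α → Int) (l : List α)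
    (h : ∀ p ∈ l, key p = 5 ∨ key p = 3 ∨ key p = 2 ∨ key p = 1 ∨ key p = 0 ∨ key p = -2) :
    PySem.List.sorted l key true
    = l.filter (fun p => decide (key p = 5)) ++ l.filter (fun p => decide (key p = 3))
      ++ l.filter (fun p => decide (key p = 2)) ++ l.filter (fun p => decide (key p = 1))
      ++ l.filter (fun p => decide (key p = 0)) ++ l.filter (fun p => decide (key p = -2)) := by
  rw [PySem.List.sorted_rev_eq_foldl_insertBy]
  have := foldl_insertBy_buckets key l [] [] [] [] [] []
    (by simp) (by simp) (by simp) (by simp) (by simp) (by simp) h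
  simpa [List.append_assoc] using this

-- B's bucket fold, from arbitrary accumulators, appends the per-score filters.
theorem bucket_fold_eq (alignment archetype : String) :
    ∀ (l : List String) (a b c d e f : List String),
    l.foldl (fun acc move =>
      let s := pvScore move alignment archetype
      if s = 5 then (acc.1 ++ [move], acc.2.1, acc.2.2.1, acc.2.2.2.1, acc.2.2.2.2.1, acc.2.2.2.2.2)
      else if s = 3 then (acc.1, acc.2.1 ++ [move], acc.2.2.1, acc.2.2.2.1, acc.2.2.2.2.1, acc.2.2.2.2.2)
      else if s = 2 then (acc.1, acc.2.1, acc.2.2.1 ++ [move], acc.2.2.2.1, acc.2.2.2.2.1, acc.2.2.2.2.2)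
      else if s = 1 then (acc.1, acc.2.1, acc.2.2.1, acc.2.2.2.1 ++ [move], acc.2.2.2.2.1, acc.2.2.2.2.2)
      else if s = 0 then (acc.1, acc.2.1, acc.2.2.1, acc.2.2.2.1, acc.2.2.2.2.1 ++ [move], acc.2.2.2.2.2)
      else (acc.1, acc.2.1, acc.2.2.1, acc.2.2.2.1, acc.2.2.2.2.1, acc.2.2.2.2.2 ++ [move])) (a, b, c, d, e, f)
    = (a ++ l.filter (fun m => decide (pvScore m alignment archetype = 5)),
       b ++ l.filter (fun m => decide (pvScore m alignment archetype = 3)),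
       c ++ l.filter (fun m => decide (pvScore m alignment archetype = 2)),
       d ++ l.filter (fun m => decide (pvScore m alignment archetype = 1)),
       e ++ l.filter (fun m => decide (pvScore m alignment archetype = 0)),
       f ++ l.filter (fun m => decide (pvScore m alignment archetype = -2))) := by
  intro l
  induction l with
  | nil => intro a b c d e f; simp
  | cons x t ih =>
      intro a b c d e f
      have hx := pvScore_range x alignment archetype
      simp only [List.foldl_cons]
      rcases hx with hx | hx | hx | hx | hx | hx <;>
        simp [hx, ih, List.append_assoc]

-- ===== VERDICT (by name: the statement is the Claim_ definition above) =====
theorem filter_moves_by_alignment_spec : Claim_equal_filter_moves_by_alignment := by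
  intro moves alignment archetype _
  unfold Spec_filter_moves_by_alignment
  unfold filter_moves_by_alignment filter_moves_by_alignment_alt
  simp only []
  -- A's scoring loop is the map with pvScore
  rw [show (fun (acc : List (String × Int)) (move : String) =>
        let move_lower := PySem.Str.lower move
        let score : Int := 0
        let score :=
          if alignment = "Heel" then
            if HEEL_KEYWORDS.any (fun kw => PySem.Str.isIn kw move_lower) then score + 3 else score
          else if alignment = "Face" then
            let score := if FACE_KEYWORDS.any (fun kw => PySem.Str.isIn kw move_lower) then score + 3 else score
            if HEEL_KEYWORDS.any (fun kw => PySem.Str.isIn kw move_lower) then score - 2 else score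
          else score
        let score :=
          if archetype = "Technical" then
            if TECHNICAL_KEYWORDS.any (fun kw => PySem.Str.isIn kw move_lower) then score + 2 else score
          else if archetype = "Powerhouse" then
            if POWER_KEYWORDS.any (fun kw => PySem.Str.isIn kw move_lower) then score + 2 else score
          else if archetype = "High Flyer" then
            if AERIAL_KEYWORDS.any (fun kw => PySem.Str.isIn kw move_lower) then score + 2 else score
          else score
        acc ++ [(move, score)])
      = fun acc move => acc ++ [(move, pvScore move alignment archetype)] from by
        funext acc move
        rw [← pvScore_eq_inline move alignment archetype]]
  rw [PySem.List.foldl_append_singleton_eq_map, bucket_fold_eq]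
  simp only [List.nil_append]
  have hfilt : ∀ s : Int,
      ((moves.map fun m => (m, pvScore m alignment archetype)).filter
        (fun p => decide (p.2 = s))).map (fun p : String × Int => p.1)
      = moves.filter (fun m => decide (pvScore m alignment archetype = s)) := by
    intro s
    rw [List.filter_map]
    simp [Function.comp_def]
  have hslice6 : ∀ {β : Type} (L : List β), PySem.List.slice L none (some 6) = L.take 6 := by
    intro β L
    rw [PySem.List.slice_to L (by norm_num), show (6 : Int).toNat = 6 from rfl]
  simp only [hslice6]
  -- the fallback branch is dead: |result| = min 6 |moves|
  have hlenS : (PySem.List.sorted (moves.map fun m => (m, pvScore m alignment archetype))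
      (fun x => x.2) true).length = moves.length := by
    rw [PySem.List.length_sorted]; simp
  rw [if_neg (by
    simp only [PySem.List.len_eq, List.length_map, List.length_take, hlenS]
    omega)]
  rw [sorted_rev_eq_buckets (fun p => p.2) (moves.map fun m => (m, pvScore m alignment archetype))
      (by rintro p hp
          simp only [List.mem_map] at hp
          obtain ⟨m, _, rfl⟩ := hp
          exact pvScore_range m alignment archetype)]
  rw [List.map_take]
  simp only [List.map_append, hfilt]
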